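-- pv_equiv track=rewrite | github.com/austinProGit/scheduler | src/schedule_inspector.py | senior_with_2000_level_courses
-- ===== SOURCE A (Python) =====
-- def schedule_length(schedule):
--     return len(schedule)
--
-- def semester_type_sequence(schedule):
--     SEMESTER_TYPE_SUCCESSOR = {'Fa': 'Sp', 'Sp': 'Su', 'Su': 'Fa'}
--     sequence = None
--     previous_season = 'Su'
--     if schedule_length(schedule) > 0:
--         sequence = []
--         for semester in schedule:
--             sequence.append(SEMESTER_TYPE_SUCCESSOR[previous_season])
--             previous_season = SEMESTER_TYPE_SUCCESSOR[previous_season]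
--     return sequence
--
-- def last_semester_type(schedule):
--     semester_types = semester_type_sequence(schedule)
--     if semester_types != None:
--         return semester_types[-1]
--     else: return None
--
-- def senior_interval(schedule):
--     last_type = last_semester_type(schedule)
--     if last_type == 'Su':
--         return -3
--     if last_type == 'Sp':
--         return -2
--     if last_type == 'Fa':
--         return -1
--
-- def senior_year_semesters_list(schedule):
--     if schedule == None or schedule == [] or schedule == [[]]:
--         return None
--     senior_semesters = []
--     index = senior_interval(schedule)
--     for i in range(index, 0):
--         for semester in schedule[i]:
--             senior_semesters.append(semester)
--     return senior_semesters
--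
-- def senior_with_2000_level_courses(schedule):
--     found = False
--     senior_year = senior_year_semesters_list(schedule)
--     if senior_year != None:
--         for course in senior_year:
--             if ' 2' in course:
--                 found = True
--                 break
--     return found
-- ===== SOURCE B (Python) =====
-- def senior_with_2000_level_courses(schedule):
--     if not schedule:
--         return False
--     k = (len(schedule) - 1) % 3 + 1
--     return any(' 2' in course
--                for semester in schedule[-k:]
--                for course in semester)
-- ===== Notes on version B (the rewrite author's own statement) =====
-- stated objective: simpler
-- what changed: Replaced the four-helper pipeline (building the whole semester-type sequence, looking up its last element, translating it to a negative interval, then an index loop collecting courses) with one function: k = (len-1) % 3 + 1 computed in closed form and a single any() over the flattened last k semesters.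
import Mathlib
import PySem

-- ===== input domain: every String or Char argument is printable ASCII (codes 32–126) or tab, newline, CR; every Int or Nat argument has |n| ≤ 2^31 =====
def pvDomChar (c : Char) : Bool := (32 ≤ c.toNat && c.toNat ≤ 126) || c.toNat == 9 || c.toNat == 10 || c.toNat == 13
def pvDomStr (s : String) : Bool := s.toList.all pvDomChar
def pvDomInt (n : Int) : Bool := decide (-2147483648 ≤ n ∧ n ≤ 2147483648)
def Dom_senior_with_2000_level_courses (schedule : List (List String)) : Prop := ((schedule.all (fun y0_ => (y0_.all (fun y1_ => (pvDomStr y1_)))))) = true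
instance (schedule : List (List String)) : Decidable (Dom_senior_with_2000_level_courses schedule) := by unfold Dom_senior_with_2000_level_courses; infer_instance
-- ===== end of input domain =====

-- B replaces A's four-helper pipeline (build the whole semester-type sequence, read its last
-- element, map it to a negative interval, index loop) by the closed form k = (len-1) % 3 + 1
-- and one any() over the flattened last k semesters — objective: simpler.

-- ===== PORT A =====
-- SEMESTER_TYPE_SUCCESSOR
def pvSuccDict : PySem.Dict String String :=
  ((PySem.Dict.empty.insert "Fa" "Sp").insert "Sp" "Su").insert "Su" "Fa"

def schedule_length (schedule : List (List String)) : Int := schedule.length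

-- builds `sequence`; loop state = (sequence, previous_season); the dict lookup always hits
-- (previous_season ∈ {"Fa","Sp","Su"}), so the `.getD ""` default is never used
def semester_type_sequence (schedule : List (List String)) : Option (List String) :=
  if schedule_length schedule > 0 then
    some ((schedule.foldl
      (fun (st : List String × String) _ =>
        let n := (pvSuccDict.get? st.2).getD ""
        (st.1 ++ [n], n)) ([], "Su")).1)
  else none

def last_semester_type (schedule : List (List String)) : Option String :=
  match semester_type_sequence schedule with
  | some seq => PySem.List.pyGet? seq (-1)   -- seq is nonempty here, so never none
  | none => none

-- implicit `return None` at the end of the Python function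
def senior_interval (schedule : List (List String)) : Option Int :=
  let last_type := last_semester_type schedule
  if last_type = some "Su" then some (-3)
  else if last_type = some "Sp" then some (-2)
  else if last_type = some "Fa" then some (-1)
  else none

def senior_year_semesters_list (schedule : List (List String)) : Option (List String) :=
  if schedule = [] ∨ schedule = [[]] then none
  else
    -- senior_interval is always `some` here (schedule ≠ []); Python would raise on None
    let index := (senior_interval schedule).getD 0
    some ((PySem.List.pyRange index 0).foldl
      (fun acc i => acc ++ PySem.List.pyGetD schedule i []) [])
      -- schedule[i] is always in range here; Python would raise otherwise

def senior_with_2000_level_courses (schedule : List (List String)) : Bool :=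
  match senior_year_semesters_list schedule with
  | none => false                                   -- found stays False
  | some senior_year => senior_year.any (fun course => PySem.Str.isIn " 2" course)  -- loop with break

-- ===== PORT B =====
def senior_with_2000_level_courses_alt (schedule : List (List String)) : Bool :=
  if schedule.isEmpty then false
  else
    let k : Int := PySem.Int.mod ((schedule.length : Int) - 1) 3 + 1
    ((PySem.List.slice schedule (some (-k)) none).flatten).any
      (fun course => PySem.Str.isIn " 2" course)

-- ===== PRECONDITION & SPEC =====
def Spec_senior_with_2000_level_courses (schedule : List (List String)) (out : Bool) : Prop := out = senior_with_2000_level_courses_alt schedule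
instance (schedule : List (List String)) (out : Bool) : Decidable (Spec_senior_with_2000_level_courses schedule out) := by unfold Spec_senior_with_2000_level_courses; infer_instance

-- ===== CLAIM (what is proved, stated in full; the proofs are below) =====
def Claim_equal_senior_with_2000_level_courses : Prop := ∀ (schedule : List (List String)), Dom_senior_with_2000_level_courses schedule → Spec_senior_with_2000_level_courses schedule (senior_with_2000_level_courses schedule)

-- ===== LEMMAS AND PROOFS =====

-- the one step of A's sequence-building loop
def pvStep (st : List String × String) (_ : List String) : List String × String :=
  let n := (pvSuccDict.get? st.2).getD ""
  (st.1 ++ [n], n)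

def pvSucc (s : String) : String := (pvSuccDict.get? s).getD ""

-- the season component of the loop state only depends on how many steps ran
theorem pvFold_snd (l : List (List String)) (acc : List String) (s : String) :
    (l.foldl pvStep (acc, s)).2 = pvSucc^[l.length] s := by
  induction l generalizing acc s with
  | nil => rfl
  | cons x xs ih =>
      simp [pvStep, Function.iterate_succ_apply, ih, pvSucc]

-- after at least one step the last appended season is the current season
theorem pvFold_getLast? (l : List (List String)) (acc : List String) (s : String) (h : l ≠ []) :
    (l.foldl pvStep (acc, s)).1.getLast? = some (l.foldl pvStep (acc, s)).2 := by
  induction l generalizing acc s with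
  | nil => exact absurd rfl h
  | cons x xs ih =>
      cases xs with
      | nil => simp [pvStep]
      | cons y ys =>
          rw [List.foldl_cons]
          exact ih _ _ (by simp)

theorem pvSucc_iterate (n : Nat) :
    pvSucc^[n] "Su" = if n % 3 = 0 then "Su" else if n % 3 = 1 then "Fa" else "Sp" := by
  induction n with
  | zero => rfl
  | succ n ih =>
      rw [Function.iterate_succ_apply', ih]
      have h3 : n % 3 = 0 ∨ n % 3 = 1 ∨ n % 3 = 2 := by omega
      rcases h3 with h | h | h <;>
        simp [h, Nat.add_mod, pvSucc, pvSuccDict, PySem.Dict.get?,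
          PySem.Dict.insert, PySem.Dict.empty]

-- A's index loop over range(-k, 0) collects exactly the last k semesters
theorem pvRange_flatMap (xs : List (List String)) (k : Nat) (hk : k ≤ xs.length) :
    (PySem.List.pyRange (-(k : Int)) 0).flatMap (fun i => PySem.List.pyGetD xs i []) =
      (xs.drop (xs.length - k)).flatten := by
  induction k with
  | zero => simp [PySem.List.pyRange_one_eq_nil]
  | succ k ih =>
      have hlt : -((k : Int) + 1) < 0 := by omega
      have hidx : xs.length - (k + 1) < xs.length := by omega
      rw [show -((k + 1 : Nat) : Int) = -((k : Int) + 1) by push_cast; ring,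
        PySem.List.pyRange_one_cons hlt,
        show -((k : Int) + 1) + 1 = -(k : Int) by ring,
        List.flatMap_cons, ih (by omega),
        List.drop_eq_getElem_cons hidx,
        show xs.length - (k + 1) + 1 = xs.length - k by omega,
        List.flatten_cons]
      congr 1
      have hidx? : PySem.List.pyIdx? xs.length (-((k : Int) + 1)) = some (xs.length - (k + 1)) := by
        simp only [PySem.List.pyIdx?]
        rw [if_neg (by omega), if_pos (by omega)]
        have ht : (-(-((k : Int) + 1))).toNat = k + 1 := by omega
        rw [ht]
      simp only [PySem.List.pyGetD, PySem.List.pyGet?]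
      rw [hidx?]
      simp [List.getElem?_eq_getElem hidx]

-- for a nonempty schedule the interval is -(((len-1) % 3) + 1)
theorem pvInterval_eq (schedule : List (List String)) (h : schedule ≠ []) :
    senior_interval schedule = some (-(((schedule.length - 1) % 3 + 1 : Nat) : Int)) := by
  have hlen : 0 < schedule.length := List.length_pos_iff.mpr h
  have hseq : semester_type_sequence schedule =
      some ((schedule.foldl pvStep ([], "Su")).1) := by
    simp only [semester_type_sequence, schedule_length]
    rw [if_pos (by exact_mod_cast hlen)]
    rfl
  have hne : (schedule.foldl pvStep ([], "Su")).1 ≠ [] := by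
    intro hc
    have := pvFold_getLast? schedule [] "Su" h
    rw [hc] at this; simp at this
  have hlast : last_semester_type schedule = some (pvSucc^[schedule.length] "Su") := by
    simp only [last_semester_type, hseq, PySem.List.pyGet?_neg_one,
      pvFold_getLast? schedule [] "Su" h, pvFold_snd]
  have h3 : schedule.length % 3 = 0 ∨ schedule.length % 3 = 1 ∨ schedule.length % 3 = 2 := by
    omega
  rcases h3 with hm | hm | hm
  · rw [show (schedule.length - 1) % 3 + 1 = 3 from by omega]
    simp [senior_interval, hlast, pvSucc_iterate, hm]
  · rw [show (schedule.length - 1) % 3 + 1 = 1 from by omega]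
    simp [senior_interval, hlast, pvSucc_iterate, hm]
  · rw [show (schedule.length - 1) % 3 + 1 = 2 from by omega]
    simp [senior_interval, hlast, pvSucc_iterate, hm]

-- ===== VERDICT (by name: the statement is the Claim_ definition above) =====
theorem senior_with_2000_level_courses_spec : Claim_equal_senior_with_2000_level_courses := by
  intro schedule _
  unfold Spec_senior_with_2000_level_courses
  by_cases h0 : schedule = []
  · subst h0; decide
  by_cases h1 : schedule = [[]]
  · subst h1; decide
  have hlen : 0 < schedule.length := List.length_pos_iff.mpr h0
  set L := schedule.length with hL
  have hk_le : (L - 1) % 3 + 1 ≤ L := by omega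
  -- A's side
  have hA : senior_with_2000_level_courses schedule =
      ((schedule.drop (L - ((L - 1) % 3 + 1))).flatten).any
        (fun course => PySem.Str.isIn " 2" course) := by
    simp only [senior_with_2000_level_courses, senior_year_semesters_list]
    rw [if_neg (by simp [h0, h1])]
    simp only [pvInterval_eq schedule h0, Option.getD_some]
    rw [PySem.List.foldl_append_eq_flatMap (fun i => PySem.List.pyGetD schedule i []) _ [],
      List.nil_append, pvRange_flatMap schedule _ hk_le]
  -- B's side
  have hB : senior_with_2000_level_courses_alt schedule =
      ((schedule.drop (L - ((L - 1) % 3 + 1))).flatten).any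
        (fun course => PySem.Str.isIn " 2" course) := by
    simp only [senior_with_2000_level_courses_alt]
    rw [if_neg (by simp [List.isEmpty_iff, h0])]
    have hmod : PySem.Int.mod (((L - 1 : Nat)) : Int) 3 = (((L - 1) % 3 : Nat) : Int) := by
      exact_mod_cast PySem.Int.mod_natCast (L - 1) 3
    rw [show ((schedule.length : Int) - 1) = ((L - 1 : Nat) : Int) from by rw [← hL]; omega,
      hmod,
      show (((L - 1) % 3 : Nat) : Int) + 1 = (((L - 1) % 3 + 1 : Nat) : Int) from by push_cast; ring,
      PySem.List.slice_from_neg_natCast schedule _ (by omega)]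
  rw [hA, hB]
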